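-- pv_equiv track=rewrite | github.com/ariecattan/SciCo | utils/conll.py | get_dict_map
-- ===== SOURCE A (Python) =====
-- import collections
-- import operator
--
-- def get_dict_map(predicted_mentions):
--     doc_start_map = collections.defaultdict(list)
--     doc_end_map = collections.defaultdict(list)
--     doc_word_map = collections.defaultdict(list)
--
--     for doc_id, start, end, cluster_id in predicted_mentions:
--         start_key = '{}_{}'.format(doc_id, start)
--         end_key = '{}_{}'.format(doc_id, end)
--
--         if start == end:
--             doc_word_map[start_key].append(cluster_id)
--         else:
--             doc_start_map[start_key].append((cluster_id, end))
--             doc_end_map[end_key].append((cluster_id, start))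
--
--     for k, v in doc_start_map.items():
--         doc_start_map[k] = [cluster_id for cluster_id, end_key in sorted(v, key=operator.itemgetter(1), reverse=True)]
--     for k, v in doc_end_map.items():
--         doc_end_map[k] = [cluster_id for cluster_id, end_key in sorted(v, key=operator.itemgetter(1), reverse=True)]
--
--
--     return doc_start_map, doc_end_map, doc_word_map
-- ===== SOURCE B (Python) =====
-- import collections
--
-- def get_dict_map(predicted_mentions):
--     doc_start_map = collections.defaultdict(list)
--     doc_end_map = collections.defaultdict(list)
--     doc_word_map = collections.defaultdict(list)
--
--     spans = [m for m in predicted_mentions if m[1] != m[2]]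
--
--     # register keys in first-occurrence order, then fill each map in one pass
--     # over a single globally (stable-)sorted list instead of sorting per bucket
--     for doc_id, start, end, cluster_id in spans:
--         doc_start_map.setdefault('{}_{}'.format(doc_id, start), [])
--         doc_end_map.setdefault('{}_{}'.format(doc_id, end), [])
--
--     for doc_id, start, end, cluster_id in sorted(spans, key=lambda m: m[2], reverse=True):
--         doc_start_map['{}_{}'.format(doc_id, start)].append(cluster_id)
--
--     for doc_id, start, end, cluster_id in sorted(spans, key=lambda m: m[1], reverse=True):
--         doc_end_map['{}_{}'.format(doc_id, end)].append(cluster_id)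
--
--     for doc_id, start, end, cluster_id in predicted_mentions:
--         if start == end:
--             doc_word_map['{}_{}'.format(doc_id, start)].append(cluster_id)
--
--     return doc_start_map, doc_end_map, doc_word_map
-- ===== Notes on version B (the rewrite author's own statement) =====
-- stated objective: alternative
-- what changed: A buckets mentions into per-key lists and then sorts every bucket; B does one global stable sort per map (by end for the start map, by start for the end map) followed by a single appending scan, with keys pre-registered in first-occurrence order.
import Mathlib
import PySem

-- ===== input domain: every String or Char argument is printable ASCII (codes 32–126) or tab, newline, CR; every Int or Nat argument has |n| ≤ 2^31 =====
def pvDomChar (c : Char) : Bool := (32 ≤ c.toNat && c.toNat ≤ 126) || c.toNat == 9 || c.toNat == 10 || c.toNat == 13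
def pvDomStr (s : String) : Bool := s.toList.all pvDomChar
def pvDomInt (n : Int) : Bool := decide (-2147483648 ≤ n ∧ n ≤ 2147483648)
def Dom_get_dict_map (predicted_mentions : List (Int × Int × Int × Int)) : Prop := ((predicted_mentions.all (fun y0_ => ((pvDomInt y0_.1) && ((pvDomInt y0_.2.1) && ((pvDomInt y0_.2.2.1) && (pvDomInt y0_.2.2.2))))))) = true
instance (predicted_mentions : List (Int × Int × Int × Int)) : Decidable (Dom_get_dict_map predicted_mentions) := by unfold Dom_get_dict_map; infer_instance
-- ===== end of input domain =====

-- B replaces A's bucket-then-sort-each-bucket pass by one global stable sort per map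
-- followed by a single appending scan (objective: alternative decomposition, same cost).

-- '{}_{}'.format(a, b)
def pvKey (a b : Int) : String := PySem.Str.join "_" [PySem.Int.toStr a, PySem.Int.toStr b]

-- ===== PORT A =====
-- first loop of A: one step updates the triple (doc_start_map, doc_end_map, doc_word_map)
def pvStepA (s : PySem.Dict String (List (Int × Int)) × PySem.Dict String (List (Int × Int)) × PySem.Dict String (List Int))
    (m : Int × Int × Int × Int) :
    PySem.Dict String (List (Int × Int)) × PySem.Dict String (List (Int × Int)) × PySem.Dict String (List Int) :=
  if m.2.1 == m.2.2.1 then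
    (s.1, s.2.1, s.2.2.modify (pvKey m.1 m.2.1) [] (· ++ [m.2.2.2]))
  else
    (s.1.modify (pvKey m.1 m.2.1) [] (· ++ [(m.2.2.2, m.2.2.1)]),
     s.2.1.modify (pvKey m.1 m.2.2.1) [] (· ++ [(m.2.2.2, m.2.1)]),
     s.2.2)

def get_dict_map (predicted_mentions : List (Int × Int × Int × Int)) : (List (String × List Int)) × (List (String × List Int)) × (List (String × List Int)) :=
  let phase1 := predicted_mentions.foldl pvStepA (PySem.Dict.empty, PySem.Dict.empty, PySem.Dict.empty)
  -- the two rewrite loops reassign every existing key in items order (key order is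
  -- unchanged); as the value type changes this is rendered as a map over the items
  let doc_start_map := phase1.1.items.map
    (fun kv => (kv.1, (PySem.List.sorted kv.2 (fun p => p.2) true).map (fun p => p.1)))
  let doc_end_map := phase1.2.1.items.map
    (fun kv => (kv.1, (PySem.List.sorted kv.2 (fun p => p.2) true).map (fun p => p.1)))
  (doc_start_map, doc_end_map, phase1.2.2.items)

-- ===== PORT B =====
def get_dict_map_alt (predicted_mentions : List (Int × Int × Int × Int)) : (List (String × List Int)) × (List (String × List Int)) × (List (String × List Int)) :=
  let spans := predicted_mentions.filter (fun m => !(m.2.1 == m.2.2.1))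
  -- key-registration loop (the two setdefaults of one pass, as a pair state)
  let reg := spans.foldl
    (fun s m => (s.1.setdefault (pvKey m.1 m.2.1) [], s.2.setdefault (pvKey m.1 m.2.2.1) []))
    ((PySem.Dict.empty : PySem.Dict String (List Int)), (PySem.Dict.empty : PySem.Dict String (List Int)))
  let doc_start_map := (PySem.List.sorted spans (fun m => m.2.2.1) true).foldl
    (fun d m => d.modify (pvKey m.1 m.2.1) [] (· ++ [m.2.2.2])) reg.1
  let doc_end_map := (PySem.List.sorted spans (fun m => m.2.1) true).foldl
    (fun d m => d.modify (pvKey m.1 m.2.2.1) [] (· ++ [m.2.2.2])) reg.2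
  let doc_word_map := predicted_mentions.foldl
    (fun d m => if m.2.1 == m.2.2.1 then d.modify (pvKey m.1 m.2.1) [] (· ++ [m.2.2.2]) else d)
    (PySem.Dict.empty : PySem.Dict String (List Int))
  (doc_start_map.items, doc_end_map.items, doc_word_map.items)

-- ===== PRECONDITION & SPEC =====
def Spec_get_dict_map (predicted_mentions : List (Int × Int × Int × Int)) (out : (List (String × List Int)) × (List (String × List Int)) × (List (String × List Int))) : Prop := out = get_dict_map_alt predicted_mentions
instance (predicted_mentions : List (Int × Int × Int × Int)) (out : (List (String × List Int)) × (List (String × List Int)) × (List (String × List Int))) : Decidable (Spec_get_dict_map predicted_mentions out) := by unfold Spec_get_dict_map; infer_instance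

-- ===== CLAIM (what is proved, stated in full; the proofs are below) =====
def Claim_equal_get_dict_map : Prop := ∀ (predicted_mentions : List (Int × Int × Int × Int)), Dom_get_dict_map predicted_mentions → Spec_get_dict_map predicted_mentions (get_dict_map predicted_mentions)

-- ===== LEMMAS AND PROOFS =====

-- insertBy commutes with map when the comparator factors through the map
theorem pv_insertBy_map {α β : Type} (before : β → β → Bool) (g : α → β) (x : α) (l : List α) :
    (PySem.List.insertBy (fun a b => before (g a) (g b)) x l).map g
      = PySem.List.insertBy before (g x) (l.map g) := by
  induction l with
  | nil => rfl
  | cons y ys ih =>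
    show (if before (g x) (g y) then _ else _ : List α).map g = _
    by_cases h : before (g x) (g y) = true <;>
      simp [PySem.List.insertBy, h, ih]

-- stable sort of a mapped list = mapped stable sort under the composed key
theorem pv_sorted_rev_map {α β : Type} (g : α → β) (key : β → Int) (l : List α) :
    PySem.List.sorted (l.map g) key true
      = (PySem.List.sorted l (fun x => key (g x)) true).map g := by
  rw [PySem.List.sorted_rev_eq_foldl_insertBy, PySem.List.sorted_rev_eq_foldl_insertBy,
    List.foldl_map]
  have aux : ∀ (l : List α) (acc : List α),
      List.foldl (fun a x => PySem.List.insertBy (fun a b => decide (key b < key a)) (g x) a)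
        (acc.map g) l
      = (List.foldl (fun a x =>
            PySem.List.insertBy (fun a b => decide (key (g b) < key (g a))) x a) acc l).map g := by
    intro l
    induction l with
    | nil => intro acc; rfl
    | cons x xs ih =>
      intro acc
      simp only [List.foldl_cons]
      rw [← pv_insertBy_map (fun a b => decide (key b < key a)) g x acc, ih]
  simpa using aux l []

theorem pv_insertBy_of_forall_before {α : Type} (before : α → α → Bool) (x : α) (l : List α)
    (h : ∀ y ∈ l, before x y = true) : PySem.List.insertBy before x l = x :: l := by
  cases l with
  | nil => rfl
  | cons y ys => simp [PySem.List.insertBy, h y (List.mem_cons_self)]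

-- filtering commutes with a stable insertion when the comparator is monotone along l
theorem pv_filter_insertBy {α : Type} (before : α → α → Bool) (p : α → Bool) (x : α) (l : List α)
    (hl : l.Pairwise (fun a b => before x a = true → before x b = true)) :
    (PySem.List.insertBy before x l).filter p
      = if p x then PySem.List.insertBy before x (l.filter p) else l.filter p := by
  induction l with
  | nil =>
    by_cases hpx : p x = true <;> simp [PySem.List.insertBy, List.filter, hpx]
  | cons y ys ih =>
    rcases List.pairwise_cons.mp hl with ⟨hy, htl⟩
    by_cases hb : before x y = true
    · have hall : ∀ z ∈ (y :: ys).filter p, before x z = true := by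
        intro z hz
        rcases List.mem_cons.mp (List.mem_of_mem_filter hz) with h1 | h2
        · subst h1; exact hb
        · exact hy z h2 hb
      rw [pv_insertBy_of_forall_before _ _ _ hall]
      simp only [PySem.List.insertBy, hb, if_true]
      by_cases hpx : p x = true <;> simp [List.filter_cons, hpx]
    · have hbf : before x y = false := Bool.eq_false_iff.mpr hb
      simp only [PySem.List.insertBy, hbf, Bool.false_eq_true, if_false]
      by_cases hpy : p y = true <;> by_cases hpx : p x = true <;>
        simp [hpy, hpx, ih htl, PySem.List.insertBy, hbf]

-- filtering commutes with the full stable sort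
theorem pv_filter_sorted_rev {α : Type} (key : α → Int) (p : α → Bool) (xs : List α) :
    (PySem.List.sorted xs key true).filter p = PySem.List.sorted (xs.filter p) key true := by
  induction xs using List.reverseRecOn with
  | nil => rfl
  | append_singleton xs x ih =>
    rw [PySem.List.sorted_rev_eq_foldl_insertBy, List.foldl_append,
      ← PySem.List.sorted_rev_eq_foldl_insertBy]
    simp only [List.foldl_cons, List.foldl_nil]
    have hpw : (PySem.List.sorted xs key true).Pairwise
        (fun a b => decide (key a < key x) = true → decide (key b < key x) = true) := by
      refine (PySem.List.sorted_pairwise_rev xs key).imp ?_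
      intro a b hle ha
      exact decide_eq_true (lt_of_le_of_lt hle (of_decide_eq_true ha))
    rw [pv_filter_insertBy _ p x _ hpw, List.filter_append, ih]
    by_cases hpx : p x = true
    · simp only [List.filter_cons, hpx, if_true, List.filter_nil]
      rw [PySem.List.sorted_rev_eq_foldl_insertBy (xs.filter p ++ [x]) key, List.foldl_append,
        ← PySem.List.sorted_rev_eq_foldl_insertBy]
      simp
    · simp [hpx]

-- keys of a setdefault loop (mirrors PySem.Dict.keys_foldl_insert_key)
theorem pv_keys_foldl_setdefault {κ ν β : Type} [BEq κ] [LawfulBEq κ] [DecidableEq κ] (l : List β) (key : β → κ)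
    (v : ν) (d : PySem.Dict κ ν) :
    (l.foldl (fun d x => d.setdefault (key x) v) d).keys = PySem.Set.update d.keys (l.map key) := by
  induction l generalizing d with
  | nil => rfl
  | cons x xs ih =>
    simp only [List.foldl_cons, List.map_cons, PySem.Set.update, ih]
    congr 1
    rw [PySem.Dict.keys_setdefault, PySem.Set.add,
      PySem.Dict.contains_eq_decide_mem_keys]
    by_cases h : key x ∈ d.keys <;> simp [h]

-- a setdefault-with-[] loop leaves every getD _ [] lookup at []
theorem pv_getD_foldl_setdefault {κ β γ : Type} [BEq κ] [LawfulBEq κ] (l : List β) (key : β → κ)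
    (d : PySem.Dict κ (List γ)) (h : ∀ k, d.getD k [] = []) :
    ∀ k, (l.foldl (fun d x => d.setdefault (key x) []) d).getD k [] = [] := by
  induction l generalizing d with
  | nil => exact h
  | cons x xs ih =>
    simp only [List.foldl_cons]
    refine ih _ ?_
    intro k
    by_cases hk : k = key x
    · subst hk; rw [PySem.Dict.getD_setdefault_self]; exact h _
    · rw [PySem.Dict.getD_eq_get?_getD, PySem.Dict.get?_setdefault_of_ne _ _ hk,
        ← PySem.Dict.getD_eq_get?_getD]
      exact h _

theorem pv_mem_set_update {α : Type} [BEq α] [LawfulBEq α] (s : PySem.Set α) (l : List α) (x : α)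
    (hx : x ∈ s ∨ x ∈ l) : x ∈ PySem.Set.update s l := by
  induction l generalizing s with
  | nil => simpa [PySem.Set.update] using hx.resolve_right (by simp)
  | cons y ys ih =>
    show x ∈ PySem.Set.update (PySem.Set.add s y) ys
    apply ih
    rcases hx with h1 | h2
    · exact Or.inl ((PySem.Set.mem_add s y x).mpr (Or.inl h1))
    · rcases List.mem_cons.mp h2 with h3 | h4
      · exact Or.inl ((PySem.Set.mem_add s y x).mpr (Or.inr h3))
      · exact Or.inr h4

theorem pv_set_update_of_subset {α : Type} [BEq α] [LawfulBEq α] (s : PySem.Set α) (l : List α)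
    (h : ∀ x ∈ l, x ∈ s) : PySem.Set.update s l = s := by
  induction l with
  | nil => rfl
  | cons x xs ih =>
    have hx : PySem.Set.add s x = s := by
      rw [PySem.Set.add]
      simp [h x List.mem_cons_self]
    show PySem.Set.update (PySem.Set.add s x) xs = s
    rw [hx]
    exact ih (fun y hy => h y (List.mem_cons_of_mem _ hy))


-- fold a guarded update = fold the update over the filtered list
theorem pv_foldl_guard {α σ : Type} (l : List α) (c : α → Bool) (F : σ → α → σ) (init : σ) :
    l.foldl (fun d m => if c m then d else F d m) init
      = (l.filter (fun m => !c m)).foldl F init := by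
  rw [List.foldl_filter]
  congr 1
  funext d m
  by_cases h : c m = true <;> simp [h]

-- getD after an append-to-key loop (pair-reshaped form of getD_foldl_modify_append)
theorem pv_getD_modify_fold {α γ : Type} (l : List α) (kf : α → String) (vf : α → γ)
    (d : PySem.Dict String (List γ)) (k : String) :
    (l.foldl (fun d m => d.modify (kf m) [] (· ++ [vf m])) d).getD k []
      = d.getD k [] ++ (l.filter (fun m => kf m == k)).map vf := by
  have h : l.foldl (fun d m => d.modify (kf m) [] (· ++ [vf m])) d
      = (l.map (fun m => (kf m, vf m))).foldl (fun d p => d.modify p.1 [] (· ++ [p.2])) d := by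
    rw [List.foldl_map]
  rw [h, PySem.Dict.getD_foldl_modify_append, List.filter_map, List.map_map]
  rfl

-- the heart of the equivalence, one statement serving the start map and the end map:
-- bucket-then-sort-each-bucket (left) = global stable sort then one appending scan (right)
theorem pv_map_eq {α : Type} (l : List α) (kf : α → String) (sortf cf : α → Int) :
    (l.foldl (fun d m => d.modify (kf m) [] (· ++ [(cf m, sortf m)]))
        (PySem.Dict.empty : PySem.Dict String (List (Int × Int)))).items.map
      (fun kv => (kv.1, (PySem.List.sorted kv.2 (fun p => p.2) true).map (fun p => p.1)))
    = ((PySem.List.sorted l sortf true).foldl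
        (fun d m => d.modify (kf m) [] (· ++ [cf m]))
        (l.foldl (fun d m => d.setdefault (kf m) [])
          (PySem.Dict.empty : PySem.Dict String (List Int)))).items := by
  set A := l.foldl (fun d m => d.modify (kf m) [] (· ++ [(cf m, sortf m)]))
      (PySem.Dict.empty : PySem.Dict String (List (Int × Int))) with hA
  set s0 := l.foldl (fun d m => d.setdefault (kf m) [])
      (PySem.Dict.empty : PySem.Dict String (List Int)) with hs0
  set B := (PySem.List.sorted l sortf true).foldl
      (fun d m => d.modify (kf m) [] (· ++ [cf m])) s0 with hB
  have hkeysA : A.keys = PySem.Set.update [] (l.map kf) := by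
    rw [hA, PySem.Dict.keys_foldl_modify_key]
    simp
  have hkeys0 : s0.keys = PySem.Set.update [] (l.map kf) := by
    rw [hs0, pv_keys_foldl_setdefault]
    simp
  have hkeysB : B.keys = A.keys := by
    rw [hB, PySem.Dict.keys_foldl_modify_key, hkeys0, ← hkeysA]
    rw [← hkeysA] at hkeys0
    apply pv_set_update_of_subset
    intro x hx
    rcases List.mem_map.mp hx with ⟨m, hm, rfl⟩
    rw [hkeysA]
    exact pv_mem_set_update _ _ _
      (Or.inr (List.mem_map_of_mem ((PySem.List.mem_sorted l sortf true m).mp hm)))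
  have hnodA : A.keys.Nodup := by
    rw [hA]
    exact PySem.Dict.nodup_keys_foldl_modify_key _ _ _ _ _ (by simp)
  have hnodB : B.keys.Nodup := by rw [hkeysB]; exact hnodA
  have hgA : ∀ k, A.getD k []
      = (l.filter (fun m => kf m == k)).map (fun m => (cf m, sortf m)) := by
    intro k
    rw [hA, pv_getD_modify_fold]
    simp
  have hg0 : ∀ k, s0.getD k [] = [] := by
    rw [hs0]
    exact pv_getD_foldl_setdefault l kf _ (fun k => by simp)
  have hgB : ∀ k, B.getD k []
      = ((PySem.List.sorted (l.filter (fun m => kf m == k)) sortf true).map cf) := by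
    intro k
    rw [hB, pv_getD_modify_fold, hg0, pv_filter_sorted_rev]
    simp
  rw [PySem.Dict.items_eq_map_keys A hnodA [], PySem.Dict.items_eq_map_keys B hnodB [],
    List.map_map, hkeysB]
  refine List.map_congr_left ?_
  intro k _
  simp only [Function.comp]
  rw [hgA k, hgB k, pv_sorted_rev_map (fun m => (cf m, sortf m)) (fun p => p.2), List.map_map]
  simp [Function.comp]

-- ===== VERDICT (by name: the statement is the Claim_ definition above) =====
-- the three component updates of A's first loop
def pvFS (d : PySem.Dict String (List (Int × Int))) (m : Int × Int × Int × Int) : PySem.Dict String (List (Int × Int)) :=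
  if m.2.1 == m.2.2.1 then d else d.modify (pvKey m.1 m.2.1) [] (· ++ [(m.2.2.2, m.2.2.1)])
def pvFE (d : PySem.Dict String (List (Int × Int))) (m : Int × Int × Int × Int) : PySem.Dict String (List (Int × Int)) :=
  if m.2.1 == m.2.2.1 then d else d.modify (pvKey m.1 m.2.2.1) [] (· ++ [(m.2.2.2, m.2.1)])
def pvFW (d : PySem.Dict String (List Int)) (m : Int × Int × Int × Int) : PySem.Dict String (List Int) :=
  if m.2.1 == m.2.2.1 then d.modify (pvKey m.1 m.2.1) [] (· ++ [m.2.2.2]) else d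

-- three independent accumulators folded together (specific triple shape of A's loop)
theorem pv_foldl_triple {β σ₁ σ₂ σ₃ : Type} (f : σ₁ → β → σ₁) (g : σ₂ → β → σ₂)
    (h : σ₃ → β → σ₃) (l : List β) (a : σ₁) (b : σ₂) (c : σ₃) :
    List.foldl (fun s e => (f s.1 e, g s.2.1 e, h s.2.2 e)) (a, b, c) l
      = (l.foldl f a, l.foldl g b, l.foldl h c) := by
  induction l generalizing a b c with
  | nil => rfl
  | cons x xs ih => simp [ih]

theorem get_dict_map_spec : Claim_equal_get_dict_map := by
  intro pm _
  unfold Spec_get_dict_map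
  simp only [get_dict_map, get_dict_map_alt]
  -- split A's triple-state loop into three independent loops
  have h3 : List.foldl pvStepA (PySem.Dict.empty, PySem.Dict.empty, PySem.Dict.empty) pm
      = (List.foldl pvFS PySem.Dict.empty pm,
         List.foldl pvFE PySem.Dict.empty pm,
         List.foldl pvFW PySem.Dict.empty pm) := by
    rw [show pvStepA = (fun s m => (pvFS s.1 m, pvFE s.2.1 m, pvFW s.2.2 m)) from by
      funext s m
      by_cases h : (m.2.1 == m.2.2.1) = true <;>
        simp [pvStepA, pvFS, pvFE, pvFW, h]]
    exact pv_foldl_triple pvFS pvFE pvFW pm _ _ _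
  rw [h3]
  -- split B's key-registration loop into its two components
  rw [show List.foldl
        (fun s (m : Int × Int × Int × Int) =>
          (s.1.setdefault (pvKey m.1 m.2.1) [], s.2.setdefault (pvKey m.1 m.2.2.1) []))
        ((PySem.Dict.empty : PySem.Dict String (List Int)),
         (PySem.Dict.empty : PySem.Dict String (List Int)))
        (pm.filter (fun m => !(m.2.1 == m.2.2.1)))
      = ((pm.filter (fun m => !(m.2.1 == m.2.2.1))).foldl
           (fun d m => d.setdefault (pvKey m.1 m.2.1) []) PySem.Dict.empty,
         (pm.filter (fun m => !(m.2.1 == m.2.2.1))).foldl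
           (fun d m => d.setdefault (pvKey m.1 m.2.2.1) []) PySem.Dict.empty) from
    PySem.List.foldl_prod_mk
      (fun (d : PySem.Dict String (List Int)) (m : Int × Int × Int × Int) =>
        d.setdefault (pvKey m.1 m.2.1) [])
      (fun (d : PySem.Dict String (List Int)) (m : Int × Int × Int × Int) =>
        d.setdefault (pvKey m.1 m.2.2.1) []) _ _ _]
  -- A's guarded loops are loops over the filtered span list
  rw [show List.foldl pvFS PySem.Dict.empty pm
      = (pm.filter (fun m => !(m.2.1 == m.2.2.1))).foldl
          (fun d m => d.modify (pvKey m.1 m.2.1) [] (· ++ [(m.2.2.2, m.2.2.1)]))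
          PySem.Dict.empty from
    pv_foldl_guard pm (fun m => m.2.1 == m.2.2.1) _ _]
  rw [show List.foldl pvFE PySem.Dict.empty pm
      = (pm.filter (fun m => !(m.2.1 == m.2.2.1))).foldl
          (fun d m => d.modify (pvKey m.1 m.2.2.1) [] (· ++ [(m.2.2.2, m.2.1)]))
          PySem.Dict.empty from
    pv_foldl_guard pm (fun m => m.2.1 == m.2.2.1) _ _]
  simp only [Prod.mk.injEq]
  refine ⟨?_, ?_, ?_⟩
  · exact pv_map_eq (pm.filter (fun m => !(m.2.1 == m.2.2.1)))
      (fun m => pvKey m.1 m.2.1) (fun m => m.2.2.1) (fun m => m.2.2.2)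
  · exact pv_map_eq (pm.filter (fun m => !(m.2.1 == m.2.2.1)))
      (fun m => pvKey m.1 m.2.2.1) (fun m => m.2.1) (fun m => m.2.2.2)
  · rfl
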